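-- pv_equiv track=rewrite | github.com/pax/ing-parser | ing-parser.py | extract_transaction_details
-- ===== SOURCE A (Python) =====
-- def extract_transaction_details(row, available_fields, tip_tranzactie):
--     """
--     Extract transaction details from a given transaction detail text.
--     """
--     details = {}
--     details_text = row['Detalii tranzactie']
--     details_text_split = details_text.split('\n')
--
--     # First, detect transaction type
--     details['Tip tranzactie'] = next((tt for tt in tip_tranzactie if details_text.startswith(tt)),
--                                       'NEW! ' + ' '.join(details_text.split()[:2]))
--     # Extract other details
--     for chunk in details_text_split:
--         for field in available_fields:
--             if field + ':' in chunk: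
--                 # Extract the value between the current and next field
--                 start_pos = chunk.find(field + ':') + len(field) + 2
--                 end_pos = len(chunk)
--                 for next_field in available_fields:
--                     if next_field + ':' in chunk and chunk.find(next_field + ':') > chunk.find(field + ':'):
--                         end_pos = min(end_pos, chunk.find(next_field + ':'))
--                 value = chunk[start_pos:end_pos].strip()
--                 details[field] = value
--
--     return details
-- ===== SOURCE B (Python) =====
-- def extract_transaction_details(row, available_fields, tip_tranzactie):
--     """
--     Extract transaction details. Per chunk: sort the distinct marker positions
--     once and build a successor map (each position -> the next strictly greater
--     one, or len(chunk)) in a single descending sweep, instead of A's per-field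
--     rescan of all other markers.
--     """
--     details = {}
--     text = row['Detalii tranzactie']
--     details['Tip tranzactie'] = next((tt for tt in tip_tranzactie if text.startswith(tt)),
--                                      'NEW! ' + ' '.join(text.split()[:2]))
--     for chunk in text.split('\n'):
--         marked = [f for f in available_fields if f + ':' in chunk]
--         nxt = {}
--         bound = len(chunk)
--         for q in sorted(set(chunk.find(f + ':') for f in marked), reverse=True):
--             nxt[q] = bound
--             bound = q
--         for f in marked:
--             p = chunk.find(f + ':')
--             details[f] = chunk[p + len(f) + 2: nxt[p]].strip()
--     return details
-- ===== Notes on version B (the rewrite author's own statement) =====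
-- stated objective: faster
-- what changed: Per chunk, B sorts the distinct marker positions once and builds a successor map (each position -> next strictly greater position, default len(chunk)) in one descending sweep, then assigns each field's value by a single map lookup; A instead rescans all other fields' markers for every present field to compute each end position.
import Mathlib
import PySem

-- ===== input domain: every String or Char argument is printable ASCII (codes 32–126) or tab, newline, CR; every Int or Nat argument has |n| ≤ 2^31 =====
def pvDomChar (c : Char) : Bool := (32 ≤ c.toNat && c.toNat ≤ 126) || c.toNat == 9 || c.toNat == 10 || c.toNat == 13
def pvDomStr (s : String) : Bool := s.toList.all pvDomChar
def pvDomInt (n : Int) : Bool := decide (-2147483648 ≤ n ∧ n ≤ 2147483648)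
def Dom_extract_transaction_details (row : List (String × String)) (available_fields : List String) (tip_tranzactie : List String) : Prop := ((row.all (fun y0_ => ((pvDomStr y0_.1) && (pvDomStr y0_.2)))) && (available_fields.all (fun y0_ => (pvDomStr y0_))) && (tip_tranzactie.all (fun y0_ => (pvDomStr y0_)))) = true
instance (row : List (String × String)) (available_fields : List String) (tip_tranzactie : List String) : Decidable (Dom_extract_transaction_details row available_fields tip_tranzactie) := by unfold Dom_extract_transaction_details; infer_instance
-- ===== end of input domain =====

-- B replaces A's per-field rescan of the other markers by one sorted successor map of marker
-- positions per chunk; the two are proved to return the same dict (same items, same order).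

-- shared helper: the marker string  field + ':'  (identical code in both Pythons)
def pvMark (f : String) : List Char := f.toList ++ [':']

-- shared helper: the 'Tip tranzactie' line, identical in both Pythons:
-- next((tt for tt in tip_tranzactie if text.startswith(tt)), 'NEW! ' + ' '.join(text.split()[:2]))
def pvTip (text : List Char) (tip_tranzactie : List String) : String :=
  match tip_tranzactie.find? (fun tt => PySem.Chars.startswith text tt.toList) with
  | some tt => tt
  | none => String.ofList ("NEW! ".toList ++ PySem.Chars.join [' '] ((PySem.Chars.split₀ text).take 2))

-- ===== PORT A =====
-- A's inner end_pos loop: rescan available_fields, taking the min find position strictly beyond p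
def pvEndA (available_fields : List String) (chunk : List Char) (p : Int) : Int :=
  available_fields.foldl (fun e nf =>
    if PySem.Chars.isIn (pvMark nf) chunk && decide (PySem.Chars.find chunk (pvMark nf) > p) then
      min e (PySem.Chars.find chunk (pvMark nf))
    else e) (PySem.List.len chunk)

-- A's per-chunk loop over available_fields
def pvChunkA (available_fields : List String) (d : PySem.Dict String String) (chunk : List Char) : PySem.Dict String String :=
  available_fields.foldl (fun d field =>
    if PySem.Chars.isIn (pvMark field) chunk then
      d.insert field (String.ofList (PySem.Chars.strip (PySem.List.slice chunk
        (some (PySem.Chars.find chunk (pvMark field) + PySem.List.len field.toList + 2))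
        (some (pvEndA available_fields chunk (PySem.Chars.find chunk (pvMark field)))))))
    else d) d

def extract_transaction_details (row : List (String × String)) (available_fields : List String) (tip_tranzactie : List String) : List (String × String) :=
  match List.lookup "Detalii tranzactie" row with
  | none => []  -- KeyError in Python; excluded by Pre_
  | some details_text =>
    (((PySem.Chars.splitOn details_text.toList ['\n']).foldl (pvChunkA available_fields)
      ((PySem.Dict.empty : PySem.Dict String String).insert "Tip tranzactie" (pvTip details_text.toList tip_tranzactie)))).items

-- ===== PORT B =====
-- marked = [f for f in available_fields if f + ':' in chunk]
def pvMarked (available_fields : List String) (chunk : List Char) : List String :=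
  available_fields.filter (fun f => PySem.Chars.isIn (pvMark f) chunk)

-- the for-loop 'for q in sorted(set(...), reverse=True): nxt[q] = bound; bound = q'
def pvNxt (available_fields : List String) (chunk : List Char) : PySem.Dict Int Int :=
  ((PySem.List.sorted
      (PySem.Set.ofList ((pvMarked available_fields chunk).map (fun f => PySem.Chars.find chunk (pvMark f))))
      (fun x => x) true).foldl
    (fun s q => (s.1.insert q s.2, q))
    ((PySem.Dict.empty : PySem.Dict Int Int), PySem.List.len chunk)).1

-- B's per-chunk loop: one lookup in the successor map per present field
-- (nxt[p] is a plain lookup in Python; the key is always present, ported as getD 0)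
def pvChunkB (available_fields : List String) (d : PySem.Dict String String) (chunk : List Char) : PySem.Dict String String :=
  let nxt := pvNxt available_fields chunk
  (pvMarked available_fields chunk).foldl (fun d f =>
    d.insert f (String.ofList (PySem.Chars.strip (PySem.List.slice chunk
      (some (PySem.Chars.find chunk (pvMark f) + PySem.List.len f.toList + 2))
      (some (nxt.getD (PySem.Chars.find chunk (pvMark f)) 0)))))) d

def extract_transaction_details_alt (row : List (String × String)) (available_fields : List String) (tip_tranzactie : List String) : List (String × String) :=
  match List.lookup "Detalii tranzactie" row with
  | none => []  -- KeyError in Python; excluded by Pre_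
  | some details_text =>
    (((PySem.Chars.splitOn details_text.toList ['\n']).foldl (pvChunkB available_fields)
      ((PySem.Dict.empty : PySem.Dict String String).insert "Tip tranzactie" (pvTip details_text.toList tip_tranzactie)))).items

-- ===== PRECONDITION & SPEC =====
-- Pre_ excludes exactly the rows without the key 'Detalii tranzactie', where the Python raises KeyError.
def Pre_extract_transaction_details (row : List (String × String)) (available_fields : List String) (tip_tranzactie : List String) : Prop :=
  (List.lookup "Detalii tranzactie" row).isSome = true
instance (row : List (String × String)) (available_fields : List String) (tip_tranzactie : List String) : Decidable (Pre_extract_transaction_details row available_fields tip_tranzactie) := by unfold Pre_extract_transaction_details; infer_instance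

def pvWitness_extract_transaction_details : (List (String × String)) × List String × List String :=
  ([("Detalii tranzactie", "Plata card\nSuma: 5 Data: azi")], ["Suma", "Data"], ["Plata"])

def Spec_extract_transaction_details (row : List (String × String)) (available_fields : List String) (tip_tranzactie : List String) (out : List (String × String)) : Prop := out = extract_transaction_details_alt row available_fields tip_tranzactie
instance (row : List (String × String)) (available_fields : List String) (tip_tranzactie : List String) (out : List (String × String)) : Decidable (Spec_extract_transaction_details row available_fields tip_tranzactie out) := by unfold Spec_extract_transaction_details; infer_instance

-- ===== CLAIM =====
def Claim_equal_extract_transaction_details : Prop := ∀ (row : List (String × String)) (available_fields : List String) (tip_tranzactie : List String), Dom_extract_transaction_details row available_fields tip_tranzactie → Pre_extract_transaction_details row available_fields tip_tranzactie → Spec_extract_transaction_details row available_fields tip_tranzactie (extract_transaction_details row available_fields tip_tranzactie)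

-- ===== LEMMAS AND PROOFS =====

-- running min with a seed: bounds and membership
lemma pv_foldl_min_le_seed (l : List Int) (b : Int) : l.foldl min b ≤ b := by
  induction l generalizing b with
  | nil => simp
  | cons x t ih => exact le_trans (ih (min b x)) (min_le_left _ _)

lemma pv_foldl_min_le_mem (l : List Int) (b x : Int) (hx : x ∈ l) : l.foldl min b ≤ x := by
  induction l generalizing b with
  | nil => cases hx
  | cons y t ih =>
    rcases List.mem_cons.1 hx with h | h
    · subst h; exact le_trans (pv_foldl_min_le_seed t _) (min_le_right _ _)
    · exact ih _ h

lemma pv_foldl_min_mem (l : List Int) (b : Int) : l.foldl min b = b ∨ l.foldl min b ∈ l := by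
  induction l generalizing b with
  | nil => exact Or.inl rfl
  | cons x t ih =>
    rw [List.foldl_cons]
    rcases ih (min b x) with h | h
    · rcases le_total b x with hle | hle
      · rw [h, min_eq_left hle]; exact Or.inl rfl
      · rw [h, min_eq_right hle]; exact Or.inr List.mem_cons_self
    · exact Or.inr (List.mem_cons_of_mem _ h)

-- min over a list with a seed depends only on the set of elements
lemma pv_foldl_min_congr (l l' : List Int) (b : Int) (h : ∀ x, x ∈ l ↔ x ∈ l') :
    l.foldl min b = l'.foldl min b := by
  apply le_antisymm
  · rcases pv_foldl_min_mem l' b with h' | h'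
    · rw [h']; exact pv_foldl_min_le_seed _ _
    · exact pv_foldl_min_le_mem _ _ _ ((h _).2 h')
  · rcases pv_foldl_min_mem l b with h' | h'
    · rw [h']; exact pv_foldl_min_le_seed _ _
    · exact pv_foldl_min_le_mem _ _ _ ((h _).1 h')

-- a fold that only inserts keys from S leaves other keys alone
lemma pv_nxt_preserve (S : List Int) (d : PySem.Dict Int Int) (b p : Int) (hp : p ∉ S) :
    ((S.foldl (fun s q => (s.1.insert q s.2, q)) (d, b)).1).getD p 0 = d.getD p 0 := by
  induction S generalizing d b with
  | nil => rfl
  | cons q t ih =>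
    have hpq : p ≠ q := fun h => hp (h ▸ List.mem_cons_self)
    rw [List.foldl_cons, ih _ _ (fun h => hp (List.mem_cons_of_mem _ h))]
    rw [PySem.Dict.getD_insert]
    simp [hpq]

-- the descending sweep's map sends each position to the min of the strictly greater ones (default b)
lemma pv_nxt_getD (S : List Int) (b : Int) (d : PySem.Dict Int Int) (p : Int)
    (hs : S.Pairwise (· > ·)) (hb : ∀ x ∈ S, x < b) (hp : p ∈ S) :
    ((S.foldl (fun s q => (s.1.insert q s.2, q)) (d, b)).1).getD p 0
      = (S.filter (fun q => decide (p < q))).foldl min b := by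
  induction S generalizing d b with
  | nil => cases hp
  | cons q t ih =>
    have hqt : ∀ r ∈ t, q > r := fun r hr => List.rel_of_pairwise_cons hs hr
    rcases List.mem_cons.1 hp with h | h
    · subst h
      have hpt : p ∉ t := fun hmem => lt_irrefl p (hqt p hmem)
      rw [List.foldl_cons, pv_nxt_preserve _ _ _ _ hpt, PySem.Dict.getD_insert]
      have hfilter : (p :: t).filter (fun q => decide (p < q)) = [] := by
        simp only [List.filter_cons, decide_eq_true_eq, lt_irrefl, if_false]
        · rw [List.filter_eq_nil_iff]
          intro r hr
          simp only [decide_eq_true_eq, not_lt]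
          exact le_of_lt (hqt r hr)
      rw [hfilter]; simp
    · have hpq : p < q := hqt p h
      rw [List.foldl_cons, ih (hs := List.Pairwise.sublist (List.sublist_cons_self _ _) hs)
            (hb := fun x hx => hqt x hx) (hp := h)]
      have : (q :: t).filter (fun r => decide (p < r)) = q :: t.filter (fun r => decide (p < r)) := by
        simp [hpq]
      rw [this, List.foldl_cons, min_eq_right (le_of_lt (hb q List.mem_cons_self))]

-- a marker that occurs in the chunk is found strictly before the end of the chunk
lemma pv_find_lt_len (chunk : List Char) (f : String)
    (h : PySem.Chars.isIn (pvMark f) chunk = true) :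
    PySem.Chars.find chunk (pvMark f) < PySem.List.len chunk := by
  have hne : PySem.Chars.find chunk (pvMark f) ≠ -1 :=
    (PySem.Chars.find_ne_neg_one_iff _ _).2 ((PySem.Chars.isIn_iff_infix _ _).1 h)
  have hnn : 0 ≤ PySem.Chars.find chunk (pvMark f) :=
    (PySem.Chars.find_nonneg_iff _ _).2 ((PySem.Chars.isIn_iff_infix _ _).1 h)
  have hspec := PySem.Chars.findFrom_natCast_spec chunk (pvMark f) 0 (Nat.zero_le _)
  simp only [Nat.cast_zero, PySem.Chars.findFrom_zero] at hspec
  have hpre := (hspec hne).2.1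
  have hlen := hpre.length_le
  have hml : 0 < (pvMark f).length := by simp [pvMark]
  simp only [List.length_drop] at hlen
  unfold PySem.List.len
  omega

-- positions of present markers, per chunk
def pvPosList (available_fields : List String) (chunk : List Char) : List Int :=
  (pvMarked available_fields chunk).map (fun f => PySem.Chars.find chunk (pvMark f))

-- the sorted distinct position list is strictly descending
lemma pv_sorted_desc (available_fields : List String) (chunk : List Char) :
    (PySem.List.sorted (PySem.Set.ofList (pvPosList available_fields chunk)) (fun x => x) true).Pairwise (· > ·) := by
  have h1 := PySem.List.sorted_pairwise_rev (PySem.Set.ofList (pvPosList available_fields chunk)) (fun x => x)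
  have h2 : (PySem.List.sorted (PySem.Set.ofList (pvPosList available_fields chunk)) (fun x => x) true).Nodup :=
    ((PySem.List.sorted_perm _ _ _).nodup_iff).2 (PySem.Set.nodup_ofList _)
  exact (h1.and h2).imp (fun {a b} hab => lt_of_le_of_ne hab.1 (Ne.symm hab.2))

-- B's successor lookup equals A's rescanning end_pos loop, for each present field
lemma pv_end_eq (available_fields : List String) (chunk : List Char) (f : String)
    (hf : f ∈ pvMarked available_fields chunk) :
    (pvNxt available_fields chunk).getD (PySem.Chars.find chunk (pvMark f)) 0
      = pvEndA available_fields chunk (PySem.Chars.find chunk (pvMark f)) := by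
  set p := PySem.Chars.find chunk (pvMark f) with hpdef
  set S := PySem.List.sorted (PySem.Set.ofList (pvPosList available_fields chunk)) (fun x => x) true with hS
  have hmemS : ∀ x, x ∈ S ↔ x ∈ pvPosList available_fields chunk := by
    intro x
    rw [hS, PySem.List.mem_sorted, PySem.Set.mem_ofList]
  have hlt : ∀ x ∈ pvPosList available_fields chunk, x < PySem.List.len chunk := by
    intro x hx
    rcases List.mem_map.1 hx with ⟨g, hg, rfl⟩
    exact pv_find_lt_len chunk g ((List.mem_filter.1 hg).2)
  have hpmem : p ∈ S := (hmemS p).2 (List.mem_map.2 ⟨f, hf, rfl⟩)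
  unfold pvNxt
  rw [show ((pvMarked available_fields chunk).map (fun f => PySem.Chars.find chunk (pvMark f)))
        = pvPosList available_fields chunk from rfl, ← hS]
  rw [pv_nxt_getD S (PySem.List.len chunk) _ p (pv_sorted_desc available_fields chunk)
        (fun x hx => hlt x ((hmemS x).1 hx)) hpmem]
  -- A's side: rewrite the rescanning loop as a min over the filtered position list
  unfold pvEndA
  rw [PySem.List.foldl_if_eq_foldl_filter]
  have hA : (available_fields.filter (fun nf =>
        PySem.Chars.isIn (pvMark nf) chunk && decide (PySem.Chars.find chunk (pvMark nf) > p))).foldl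
        (fun e nf => min e (PySem.Chars.find chunk (pvMark nf))) (PySem.List.len chunk)
      = ((pvPosList available_fields chunk).filter (fun q => decide (p < q))).foldl min (PySem.List.len chunk) := by
    unfold pvPosList pvMarked
    rw [List.filter_map, List.foldl_map, List.filter_filter]
    exact congrArg _ (List.filter_congr (fun x _ => by rw [Bool.and_comm]; rfl))
  rw [hA]
  apply pv_foldl_min_congr
  intro x
  simp only [List.mem_filter]
  exact and_congr_left' (hmemS x)

-- the two per-chunk loops produce the same dict
lemma pv_chunk_eq (available_fields : List String) (d : PySem.Dict String String) (chunk : List Char) :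
    pvChunkA available_fields d chunk = pvChunkB available_fields d chunk := by
  unfold pvChunkA pvChunkB
  rw [PySem.List.foldl_if_eq_foldl_filter]
  refine PySem.List.foldl_congr_mem _ _ _ _ ?_
  intro acc f hf
  rw [pv_end_eq available_fields chunk f hf]

-- ===== VERDICT =====
theorem extract_transaction_details_spec : Claim_equal_extract_transaction_details := by
  intro row available_fields tip_tranzactie _dom _pre
  unfold Spec_extract_transaction_details
  unfold extract_transaction_details extract_transaction_details_alt
  cases h : List.lookup "Detalii tranzactie" row with
  | none => rfl
  | some details_text =>
    exact congrArg PySem.Dict.items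
      (PySem.List.foldl_congr_mem _ _ _ _ (fun acc x _ => pv_chunk_eq available_fields acc x))
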